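-- pv_equiv track=rewrite | github.com/guptaarchit/agent | mcp_client.py | _auto_detect_call_meta
-- ===== SOURCE A (Python) =====
-- from typing import Any, List, Optional, Type
--
-- _CALL_META_CANDIDATES = [
--     "call_internal_tool",
--     "run_tool_with_params",
--     "run_internal_tool",
--     "invoke_internal_tool",
--     "execute_internal_tool",
--     "dispatch_internal_tool",
--     "call_tool",
--     "run_tool",
--     "invoke_tool",
--     "execute_tool",
-- ]
--
-- def _auto_detect_call_meta(gateway_names: List[str], configured: str) -> Optional[str]:
--     """Pick the gateway's call meta-tool: user override > known names > heuristic."""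
--     if configured in gateway_names:
--         return configured
--     for name in _CALL_META_CANDIDATES:
--         if name in gateway_names:
--             return name
--     # Heuristic: something with "tool" and one of call/run/invoke/execute/dispatch
--     for gn in gateway_names:
--         low = gn.lower()
--         if "tool" in low and any(
--             kw in low for kw in ("call", "run", "invoke", "execute", "dispatch")
--         ):
--             return gn
--     return None
-- ===== SOURCE B (Python) =====
-- from typing import List, Optional
--
-- _CALL_META_CANDIDATES = [
--     "call_internal_tool",
--     "run_tool_with_params",
--     "run_internal_tool",
--     "invoke_internal_tool",
--     "execute_internal_tool",
--     "dispatch_internal_tool",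
--     "call_tool",
--     "run_tool",
--     "invoke_tool",
--     "execute_tool",
-- ]
--
-- _RANK = {name: i for i, name in enumerate(_CALL_META_CANDIDATES)}
--
--
-- def _rank(configured: str, gn: str) -> Optional[int]:
--     return -1 if gn == configured else _RANK.get(gn)
--
--
-- def _heur(gn: str) -> bool:
--     low = gn.lower()
--     return "tool" in low and (
--         "call" in low or "run" in low or "invoke" in low
--         or "execute" in low or "dispatch" in low
--     )
--
--
-- def _auto_detect_call_meta(gateway_names: List[str], configured: str) -> Optional[str]:
--     best = None  # (rank, name) with the smallest rank seen so far (first wins ties)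
--     for gn in gateway_names:
--         r = _rank(configured, gn)
--         if r is not None and (best is None or r < best[0]):
--             best = (r, gn)
--     if best is not None:
--         return best[1]
--     return next((gn for gn in gateway_names if _heur(gn)), None)
-- ===== Notes on version B (the rewrite author's own statement) =====
-- stated objective: alternative
-- what changed: Replaced the configured-membership test plus ten separate candidate membership scans by a single pass over gateway_names that tracks the minimum-rank name via a precomputed name-to-priority dict (configured ranked -1), falling back to the unchanged heuristic.
import Mathlib
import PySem

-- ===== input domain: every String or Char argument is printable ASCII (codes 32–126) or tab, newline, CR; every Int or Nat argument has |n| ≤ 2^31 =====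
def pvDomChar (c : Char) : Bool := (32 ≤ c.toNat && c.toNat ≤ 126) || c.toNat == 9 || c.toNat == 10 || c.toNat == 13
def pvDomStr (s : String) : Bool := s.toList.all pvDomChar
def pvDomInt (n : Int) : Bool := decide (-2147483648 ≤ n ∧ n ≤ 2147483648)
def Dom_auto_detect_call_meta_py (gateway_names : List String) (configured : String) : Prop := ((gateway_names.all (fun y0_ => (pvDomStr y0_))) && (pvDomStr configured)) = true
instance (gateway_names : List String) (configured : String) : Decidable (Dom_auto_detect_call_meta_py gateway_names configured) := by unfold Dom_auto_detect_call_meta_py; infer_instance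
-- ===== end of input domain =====

-- B replaces A's configured-membership test plus ten candidate membership scans by one
-- min-rank pass over gateway_names driven by a precomputed name→priority dict (alternative
-- decomposition, same asymptotic cost); the heuristic fallback is unchanged.

-- ===== PORT A =====
def pvCands : List String :=
  ["call_internal_tool", "run_tool_with_params", "run_internal_tool", "invoke_internal_tool", "execute_internal_tool", "dispatch_internal_tool", "call_tool", "run_tool", "invoke_tool", "execute_tool"]

-- heuristic body shared by both Pythons: "tool" in gn.lower() and any(kw in low ...)
def pvHeurP (gn : String) : Bool :=
  let low := PySem.Str.lower gn
  PySem.Str.isIn "tool" low &&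
    (PySem.Str.isIn "call" low || PySem.Str.isIn "run" low || PySem.Str.isIn "invoke" low ||
     PySem.Str.isIn "execute" low || PySem.Str.isIn "dispatch" low)

-- A's second loop: first gateway name passing the heuristic
def pvHeurLoop : List String → Option String
  | [] => none
  | gn :: rest => if pvHeurP gn then some gn else pvHeurLoop rest

-- A's first loop: first candidate that is a member of gateway_names
def pvCandLoop (g : List String) : List String → Option String
  | [] => none
  | c :: rest => if c ∈ g then some c else pvCandLoop g rest

def auto_detect_call_meta_py (gateway_names : List String) (configured : String) : Option String :=
  if configured ∈ gateway_names then some configured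
  else
    match pvCandLoop gateway_names pvCands with
    | some name => some name
    | none => pvHeurLoop gateway_names

-- ===== PORT B =====
-- _RANK = {name: i for i, name in enumerate(_CALL_META_CANDIDATES)}
def pvRankDict : PySem.Dict String Int :=
  (PySem.List.enumerate pvCands 0).foldl (fun d p => d.insert p.2 p.1) PySem.Dict.empty

-- _rank(configured, gn)
def pvRank (configured : String) (gn : String) : Option Int :=
  if gn == configured then some (-1) else pvRankDict.get? gn

def auto_detect_call_meta_py_alt (gateway_names : List String) (configured : String) : Option String :=
  let best := gateway_names.foldl
    (fun acc gn =>
      match pvRank configured gn with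
      | none => acc
      | some r =>
        match acc with
        | none => some (r, gn)
        | some b => if r < b.1 then some (r, gn) else some b)
    none
  match best with
  | some b => some b.2
  | none => List.find? pvHeurP gateway_names

-- ===== PRECONDITION & SPEC =====
def Spec_auto_detect_call_meta_py (gateway_names : List String) (configured : String) (out : Option String) : Prop := out = auto_detect_call_meta_py_alt gateway_names configured
instance (gateway_names : List String) (configured : String) (out : Option String) : Decidable (Spec_auto_detect_call_meta_py gateway_names configured out) := by unfold Spec_auto_detect_call_meta_py; infer_instance

-- ===== CLAIM (what is proved, stated in full; the proofs are below) =====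
def Claim_equal_auto_detect_call_meta_py : Prop := ∀ (gateway_names : List String) (configured : String), Dom_auto_detect_call_meta_py gateway_names configured → Spec_auto_detect_call_meta_py gateway_names configured (auto_detect_call_meta_py gateway_names configured)

-- ===== LEMMAS AND PROOFS =====

-- generic min-rank machinery: B's fold step, abstracted over the rank function
def pvStep (ρ : String → Option Int) (acc : Option (Int × String)) (gn : String) : Option (Int × String) :=
  match ρ gn with
  | none => acc
  | some r =>
    match acc with
    | none => some (r, gn)
    | some b => if r < b.1 then some (r, gn) else some b

def pvCombine : Option (Int × String) → Option (Int × String) → Option (Int × String)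
  | none, v => v
  | some u, none => some u
  | some u, some v => if v.1 < u.1 then some v else some u

def pvBestOf (ρ : String → Option Int) : List String → Option (Int × String)
  | [] => none
  | gn :: rest => pvCombine ((ρ gn).map (fun r => (r, gn))) (pvBestOf ρ rest)

theorem pvStep_eq (ρ : String → Option Int) (acc : Option (Int × String)) (gn : String) :
    pvStep ρ acc gn = pvCombine acc ((ρ gn).map (fun r => (r, gn))) := by
  cases h : ρ gn <;> cases acc <;> simp [pvStep, pvCombine, h]

theorem pvCombine_assoc (u v w : Option (Int × String)) :
    pvCombine (pvCombine u v) w = pvCombine u (pvCombine v w) := by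
  rcases u with _ | u <;> rcases v with _ | v <;> rcases w with _ | w <;>
    simp only [pvCombine] <;>
    split_ifs <;>
    first | rfl | (exfalso; omega) | (simp only [pvCombine]; split_ifs <;> first | rfl | (exfalso; omega))

theorem pvFoldl_eq_bestOf (ρ : String → Option Int) :
    ∀ (g : List String) (acc : Option (Int × String)),
      List.foldl (pvStep ρ) acc g = pvCombine acc (pvBestOf ρ g) := by
  intro g
  induction g with
  | nil => intro acc; cases acc <;> simp [pvBestOf, pvCombine]
  | cons a t ih =>
    intro acc
    calc List.foldl (pvStep ρ) acc (a :: t)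
        = List.foldl (pvStep ρ) (pvStep ρ acc a) t := rfl
      _ = pvCombine (pvStep ρ acc a) (pvBestOf ρ t) := ih _
      _ = pvCombine (pvCombine acc ((ρ a).map (fun r => (r, a)))) (pvBestOf ρ t) := by
            rw [pvStep_eq]
      _ = pvCombine acc (pvBestOf ρ (a :: t)) := by
            rw [pvCombine_assoc]; rfl

theorem pvBestOf_none_iff (ρ : String → Option Int) :
    ∀ g : List String, pvBestOf ρ g = none ↔ ∀ x ∈ g, ρ x = none := by
  intro g
  induction g with
  | nil => simp [pvBestOf]
  | cons a t ih =>
    cases ha : ρ a with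
    | none =>
      simp only [pvBestOf, ha, Option.map_none, pvCombine]
      constructor
      · intro h x hx
        rcases List.mem_cons.mp hx with rfl | hx'
        · exact ha
        · exact (ih.mp h) x hx'
      · intro h; exact ih.mpr (fun x hx => h x (List.mem_cons_of_mem _ hx))
    | some ra =>
      simp only [pvBestOf, ha, Option.map_some]
      constructor
      · intro h; exfalso; cases hb : pvBestOf ρ t <;> simp [pvCombine, hb] at h
        split at h <;> simp at h
      · intro h; exact absurd (h a List.mem_cons_self) (by simp [ha])

theorem pvBestOf_spec (ρ : String → Option Int) :
    ∀ (g : List String) (r : Int) (n : String), pvBestOf ρ g = some (r, n) →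
      n ∈ g ∧ ρ n = some r ∧ ∀ x ∈ g, ∀ s : Int, ρ x = some s → r ≤ s := by
  intro g
  induction g with
  | nil => intro r n h; simp [pvBestOf] at h
  | cons a t ih =>
    intro r n h
    rw [pvBestOf] at h
    cases ha : ρ a with
    | none =>
      rw [ha] at h; simp only [Option.map_none] at h
      have h' : pvBestOf ρ t = some (r, n) := h
      obtain ⟨hm, hr, hmin⟩ := ih r n h'
      refine ⟨List.mem_cons_of_mem _ hm, hr, ?_⟩
      intro x hx s hs
      rcases List.mem_cons.mp hx with rfl | hx'
      · rw [ha] at hs; cases hs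
      · exact hmin x hx' s hs
    | some ra =>
      rw [ha] at h; simp only [Option.map_some] at h
      cases hb : pvBestOf ρ t with
      | none =>
        rw [hb] at h
        simp only [pvCombine] at h
        obtain ⟨rfl, rfl⟩ : ra = r ∧ a = n := by
          constructor <;> injection h with h' <;> cases h' <;> rfl
        refine ⟨List.mem_cons_self, ha, ?_⟩
        intro x hx s hs
        rcases List.mem_cons.mp hx with rfl | hx'
        · rw [ha] at hs; injection hs with h'; omega
        · exact absurd hs (by rw [(pvBestOf_none_iff ρ t).mp hb x hx']; simp)
      | some bv =>
        rw [hb] at h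
        obtain ⟨rb, nb⟩ := bv
        obtain ⟨hmb, hrb, hminb⟩ := ih rb nb hb
        simp only [pvCombine] at h
        split at h
        · -- rb < ra : tail wins
          injection h with h'
          obtain ⟨rfl, rfl⟩ : rb = r ∧ nb = n := by
            constructor <;> cases h' <;> rfl
          refine ⟨List.mem_cons_of_mem _ hmb, hrb, ?_⟩
          intro x hx s hs
          rcases List.mem_cons.mp hx with rfl | hx'
          · rw [ha] at hs; injection hs with h''; omega
          · exact hminb x hx' s hs
        · -- head wins (ra ≤ rb)
          injection h with h'
          obtain ⟨rfl, rfl⟩ : ra = r ∧ a = n := by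
            constructor <;> cases h' <;> rfl
          refine ⟨List.mem_cons_self, ha, ?_⟩
          intro x hx s hs
          rcases List.mem_cons.mp hx with rfl | hx'
          · rw [ha] at hs; injection hs with h''; omega
          · have := hminb x hx' s hs; omega

theorem pvBestOf_min (ρ : String → Option Int)
    (hinj : ∀ x y r, ρ x = some r → ρ y = some r → x = y)
    (g : List String) (r : Int) (n : String)
    (hmem : n ∈ g) (hr : ρ n = some r)
    (hmin : ∀ x ∈ g, ∀ s : Int, ρ x = some s → r ≤ s) :
    pvBestOf ρ g = some (r, n) := by
  cases h : pvBestOf ρ g with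
  | none => exact absurd hr (by rw [(pvBestOf_none_iff ρ g).mp h n hmem]; simp)
  | some b =>
    obtain ⟨r', n'⟩ := b
    obtain ⟨hm', hr', hmin'⟩ := pvBestOf_spec ρ g r' n' h
    have h1 : r ≤ r' := hmin n' hm' r' hr'
    have h2 : r' ≤ r := hmin' n hmem r hr
    have hrr : r' = r := le_antisymm h2 h1
    subst hrr
    rw [hinj n' n r' hr' hr]

theorem pvDget_spec (n : String) (i : Int) (h : pvRankDict.get? n = some i) :
    (i = 0 ∧ n = "call_internal_tool") ∨
      (i = 1 ∧ n = "run_tool_with_params") ∨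
      (i = 2 ∧ n = "run_internal_tool") ∨
      (i = 3 ∧ n = "invoke_internal_tool") ∨
      (i = 4 ∧ n = "execute_internal_tool") ∨
      (i = 5 ∧ n = "dispatch_internal_tool") ∨
      (i = 6 ∧ n = "call_tool") ∨
      (i = 7 ∧ n = "run_tool") ∨
      (i = 8 ∧ n = "invoke_tool") ∨
      (i = 9 ∧ n = "execute_tool") := by
  simp only [pvRankDict, pvCands, PySem.List.enumerate_cons, PySem.List.enumerate_nil, List.foldl] at h
  by_cases h9 : n = "execute_tool"
  · subst h9; rw [PySem.Dict.get?_insert_self] at h; simp_all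
  · rw [PySem.Dict.get?_insert_of_ne (hne := h9)] at h
    by_cases h8 : n = "invoke_tool"
    · subst h8; rw [PySem.Dict.get?_insert_self] at h; simp_all
    · rw [PySem.Dict.get?_insert_of_ne (hne := h8)] at h
      by_cases h7 : n = "run_tool"
      · subst h7; rw [PySem.Dict.get?_insert_self] at h; simp_all
      · rw [PySem.Dict.get?_insert_of_ne (hne := h7)] at h
        by_cases h6 : n = "call_tool"
        · subst h6; rw [PySem.Dict.get?_insert_self] at h; simp_all
        · rw [PySem.Dict.get?_insert_of_ne (hne := h6)] at h
          by_cases h5 : n = "dispatch_internal_tool"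
          · subst h5; rw [PySem.Dict.get?_insert_self] at h; simp_all
          · rw [PySem.Dict.get?_insert_of_ne (hne := h5)] at h
            by_cases h4 : n = "execute_internal_tool"
            · subst h4; rw [PySem.Dict.get?_insert_self] at h; simp_all
            · rw [PySem.Dict.get?_insert_of_ne (hne := h4)] at h
              by_cases h3 : n = "invoke_internal_tool"
              · subst h3; rw [PySem.Dict.get?_insert_self] at h; simp_all
              · rw [PySem.Dict.get?_insert_of_ne (hne := h3)] at h
                by_cases h2 : n = "run_internal_tool"
                · subst h2; rw [PySem.Dict.get?_insert_self] at h; simp_all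
                · rw [PySem.Dict.get?_insert_of_ne (hne := h2)] at h
                  by_cases h1 : n = "run_tool_with_params"
                  · subst h1; rw [PySem.Dict.get?_insert_self] at h; simp_all
                  · rw [PySem.Dict.get?_insert_of_ne (hne := h1)] at h
                    by_cases h0 : n = "call_internal_tool"
                    · subst h0; rw [PySem.Dict.get?_insert_self] at h; simp_all
                    · rw [PySem.Dict.get?_insert_of_ne (hne := h0)] at h
                      simp [PySem.Dict.get?_empty] at h

theorem pvDget_nonneg (n : String) (i : Int) (h : pvRankDict.get? n = some i) : 0 ≤ i := by
  rcases pvDget_spec n i h with ⟨rfl, rfl⟩ | ⟨rfl, rfl⟩ | ⟨rfl, rfl⟩ | ⟨rfl, rfl⟩ | ⟨rfl, rfl⟩ | ⟨rfl, rfl⟩ | ⟨rfl, rfl⟩ | ⟨rfl, rfl⟩ | ⟨rfl, rfl⟩ | ⟨rfl, rfl⟩ <;> omega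

theorem pvRank_self (c : String) : pvRank c c = some (-1) := by simp [pvRank]

theorem pvRank_of_ne (c n : String) (h : n ≠ c) : pvRank c n = pvRankDict.get? n := by
  simp [pvRank, h]

theorem pvRank_inj (conf : String) :
    ∀ x y r, pvRank conf x = some r → pvRank conf y = some r → x = y := by
  intro x y r hx hy
  by_cases hxc : x = conf <;> by_cases hyc : y = conf
  · rw [hxc, hyc]
  · rw [hxc, pvRank_self] at hx
    injection hx with h'
    rw [pvRank_of_ne conf y hyc, ← h'] at hy
    have := pvDget_nonneg y (-1) hy; omega
  · rw [hyc, pvRank_self] at hy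
    injection hy with h'
    rw [pvRank_of_ne conf x hxc, ← h'] at hx
    have := pvDget_nonneg x (-1) hx; omega
  · rw [pvRank_of_ne conf x hxc] at hx
    rw [pvRank_of_ne conf y hyc] at hy
    have Hy := pvDget_spec y r hy
    rcases pvDget_spec x r hx with ⟨rfl, rfl⟩ | ⟨rfl, rfl⟩ | ⟨rfl, rfl⟩ | ⟨rfl, rfl⟩ | ⟨rfl, rfl⟩ | ⟨rfl, rfl⟩ | ⟨rfl, rfl⟩ | ⟨rfl, rfl⟩ | ⟨rfl, rfl⟩ | ⟨rfl, rfl⟩ <;>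
      rcases Hy with ⟨h', rfl⟩ | ⟨h', rfl⟩ | ⟨h', rfl⟩ | ⟨h', rfl⟩ | ⟨h', rfl⟩ | ⟨h', rfl⟩ | ⟨h', rfl⟩ | ⟨h', rfl⟩ | ⟨h', rfl⟩ | ⟨h', rfl⟩ <;> first | rfl | omega

theorem pvHeurLoop_eq_find (g : List String) : pvHeurLoop g = List.find? pvHeurP g := by
  induction g with
  | nil => rfl
  | cons a t ih => rw [pvHeurLoop, List.find?_cons]; cases h : pvHeurP a <;> simp [h, ih]

theorem pvAlt_eq (g : List String) (conf : String) :
    auto_detect_call_meta_py_alt g conf =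
      match pvBestOf (pvRank conf) g with
      | some b => some b.2
      | none => List.find? pvHeurP g := by
  unfold auto_detect_call_meta_py_alt
  have h : List.foldl (pvStep (pvRank conf)) none g = pvBestOf (pvRank conf) g := by
    rw [pvFoldl_eq_bestOf]; cases pvBestOf (pvRank conf) g <;> rfl
  show (match List.foldl (pvStep (pvRank conf)) none g with
        | some b => some b.2
        | none => List.find? pvHeurP g) = _
  rw [h]

theorem pvAlt_of_best (g : List String) (conf : String) (r : Int) (n : String)
    (hmem : n ∈ g) (hr : pvRank conf n = some r)
    (hmin : ∀ x ∈ g, ∀ s : Int, pvRank conf x = some s → r ≤ s) :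
    auto_detect_call_meta_py_alt g conf = some n := by
  rw [pvAlt_eq, pvBestOf_min (pvRank conf) (pvRank_inj conf) g r n hmem hr hmin]

theorem pvAlt_of_none (g : List String) (conf : String)
    (h : ∀ x ∈ g, pvRank conf x = none) :
    auto_detect_call_meta_py_alt g conf = List.find? pvHeurP g := by
  rw [pvAlt_eq, (pvBestOf_none_iff (pvRank conf) g).mpr h]

theorem pvMain (g : List String) (conf : String) :
    auto_detect_call_meta_py g conf = auto_detect_call_meta_py_alt g conf := by
  by_cases hc : conf ∈ g
  · rw [auto_detect_call_meta_py, if_pos hc]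
    refine (pvAlt_of_best g conf (-1) conf hc (pvRank_self conf) ?_).symm
    intro x hx s hs
    by_cases hxc : x = conf
    · subst hxc; rw [pvRank_self] at hs; injection hs with h'; omega
    · rw [pvRank_of_ne conf x hxc] at hs
      have := pvDget_nonneg x s hs; omega
  · rw [auto_detect_call_meta_py, if_neg hc]
    by_cases h0 : ("call_internal_tool" : String) ∈ g
    · have hA : pvCandLoop g pvCands = some "call_internal_tool" := by
        simp only [pvCandLoop, pvCands, if_pos h0]
      rw [hA]
      have hne : ("call_internal_tool" : String) ≠ conf := fun e => hc (e ▸ h0)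
      refine (pvAlt_of_best g conf 0 "call_internal_tool" h0 ?_ ?_).symm
      · rw [pvRank_of_ne conf _ hne]; decide
      · intro x hx s hs
        have hxc : x ≠ conf := fun e => hc (e ▸ hx)
        rw [pvRank_of_ne conf x hxc] at hs
        rcases pvDget_spec x s hs with ⟨rfl, rfl⟩ | ⟨rfl, rfl⟩ | ⟨rfl, rfl⟩ | ⟨rfl, rfl⟩ | ⟨rfl, rfl⟩ | ⟨rfl, rfl⟩ | ⟨rfl, rfl⟩ | ⟨rfl, rfl⟩ | ⟨rfl, rfl⟩ | ⟨rfl, rfl⟩ <;>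
          first | omega
    · -- candidate 0 not present; continue
      by_cases h1 : ("run_tool_with_params" : String) ∈ g
      · have hA : pvCandLoop g pvCands = some "run_tool_with_params" := by
          simp only [pvCandLoop, pvCands, if_neg h0, if_pos h1]
        rw [hA]
        have hne : ("run_tool_with_params" : String) ≠ conf := fun e => hc (e ▸ h1)
        refine (pvAlt_of_best g conf 1 "run_tool_with_params" h1 ?_ ?_).symm
        · rw [pvRank_of_ne conf _ hne]; decide
        · intro x hx s hs
          have hxc : x ≠ conf := fun e => hc (e ▸ hx)
          rw [pvRank_of_ne conf x hxc] at hs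
          rcases pvDget_spec x s hs with ⟨rfl, rfl⟩ | ⟨rfl, rfl⟩ | ⟨rfl, rfl⟩ | ⟨rfl, rfl⟩ | ⟨rfl, rfl⟩ | ⟨rfl, rfl⟩ | ⟨rfl, rfl⟩ | ⟨rfl, rfl⟩ | ⟨rfl, rfl⟩ | ⟨rfl, rfl⟩ <;>
            first | omega | (exact absurd hx h0)
      · -- candidate 1 not present; continue
        by_cases h2 : ("run_internal_tool" : String) ∈ g
        · have hA : pvCandLoop g pvCands = some "run_internal_tool" := by
            simp only [pvCandLoop, pvCands, if_neg h0, if_neg h1, if_pos h2]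
          rw [hA]
          have hne : ("run_internal_tool" : String) ≠ conf := fun e => hc (e ▸ h2)
          refine (pvAlt_of_best g conf 2 "run_internal_tool" h2 ?_ ?_).symm
          · rw [pvRank_of_ne conf _ hne]; decide
          · intro x hx s hs
            have hxc : x ≠ conf := fun e => hc (e ▸ hx)
            rw [pvRank_of_ne conf x hxc] at hs
            rcases pvDget_spec x s hs with ⟨rfl, rfl⟩ | ⟨rfl, rfl⟩ | ⟨rfl, rfl⟩ | ⟨rfl, rfl⟩ | ⟨rfl, rfl⟩ | ⟨rfl, rfl⟩ | ⟨rfl, rfl⟩ | ⟨rfl, rfl⟩ | ⟨rfl, rfl⟩ | ⟨rfl, rfl⟩ <;>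
              first | omega | (exact absurd hx h0) | (exact absurd hx h1)
        · -- candidate 2 not present; continue
          by_cases h3 : ("invoke_internal_tool" : String) ∈ g
          · have hA : pvCandLoop g pvCands = some "invoke_internal_tool" := by
              simp only [pvCandLoop, pvCands, if_neg h0, if_neg h1, if_neg h2, if_pos h3]
            rw [hA]
            have hne : ("invoke_internal_tool" : String) ≠ conf := fun e => hc (e ▸ h3)
            refine (pvAlt_of_best g conf 3 "invoke_internal_tool" h3 ?_ ?_).symm
            · rw [pvRank_of_ne conf _ hne]; decide
            · intro x hx s hs
              have hxc : x ≠ conf := fun e => hc (e ▸ hx)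
              rw [pvRank_of_ne conf x hxc] at hs
              rcases pvDget_spec x s hs with ⟨rfl, rfl⟩ | ⟨rfl, rfl⟩ | ⟨rfl, rfl⟩ | ⟨rfl, rfl⟩ | ⟨rfl, rfl⟩ | ⟨rfl, rfl⟩ | ⟨rfl, rfl⟩ | ⟨rfl, rfl⟩ | ⟨rfl, rfl⟩ | ⟨rfl, rfl⟩ <;>
                first | omega | (exact absurd hx h0) | (exact absurd hx h1) | (exact absurd hx h2)
          · -- candidate 3 not present; continue
            by_cases h4 : ("execute_internal_tool" : String) ∈ g
            · have hA : pvCandLoop g pvCands = some "execute_internal_tool" := by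
                simp only [pvCandLoop, pvCands, if_neg h0, if_neg h1, if_neg h2, if_neg h3, if_pos h4]
              rw [hA]
              have hne : ("execute_internal_tool" : String) ≠ conf := fun e => hc (e ▸ h4)
              refine (pvAlt_of_best g conf 4 "execute_internal_tool" h4 ?_ ?_).symm
              · rw [pvRank_of_ne conf _ hne]; decide
              · intro x hx s hs
                have hxc : x ≠ conf := fun e => hc (e ▸ hx)
                rw [pvRank_of_ne conf x hxc] at hs
                rcases pvDget_spec x s hs with ⟨rfl, rfl⟩ | ⟨rfl, rfl⟩ | ⟨rfl, rfl⟩ | ⟨rfl, rfl⟩ | ⟨rfl, rfl⟩ | ⟨rfl, rfl⟩ | ⟨rfl, rfl⟩ | ⟨rfl, rfl⟩ | ⟨rfl, rfl⟩ | ⟨rfl, rfl⟩ <;>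
                  first | omega | (exact absurd hx h0) | (exact absurd hx h1) | (exact absurd hx h2) | (exact absurd hx h3)
            · -- candidate 4 not present; continue
              by_cases h5 : ("dispatch_internal_tool" : String) ∈ g
              · have hA : pvCandLoop g pvCands = some "dispatch_internal_tool" := by
                  simp only [pvCandLoop, pvCands, if_neg h0, if_neg h1, if_neg h2, if_neg h3, if_neg h4, if_pos h5]
                rw [hA]
                have hne : ("dispatch_internal_tool" : String) ≠ conf := fun e => hc (e ▸ h5)
                refine (pvAlt_of_best g conf 5 "dispatch_internal_tool" h5 ?_ ?_).symm
                · rw [pvRank_of_ne conf _ hne]; decide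
                · intro x hx s hs
                  have hxc : x ≠ conf := fun e => hc (e ▸ hx)
                  rw [pvRank_of_ne conf x hxc] at hs
                  rcases pvDget_spec x s hs with ⟨rfl, rfl⟩ | ⟨rfl, rfl⟩ | ⟨rfl, rfl⟩ | ⟨rfl, rfl⟩ | ⟨rfl, rfl⟩ | ⟨rfl, rfl⟩ | ⟨rfl, rfl⟩ | ⟨rfl, rfl⟩ | ⟨rfl, rfl⟩ | ⟨rfl, rfl⟩ <;>
                    first | omega | (exact absurd hx h0) | (exact absurd hx h1) | (exact absurd hx h2) | (exact absurd hx h3) | (exact absurd hx h4)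
              · -- candidate 5 not present; continue
                by_cases h6 : ("call_tool" : String) ∈ g
                · have hA : pvCandLoop g pvCands = some "call_tool" := by
                    simp only [pvCandLoop, pvCands, if_neg h0, if_neg h1, if_neg h2, if_neg h3, if_neg h4, if_neg h5, if_pos h6]
                  rw [hA]
                  have hne : ("call_tool" : String) ≠ conf := fun e => hc (e ▸ h6)
                  refine (pvAlt_of_best g conf 6 "call_tool" h6 ?_ ?_).symm
                  · rw [pvRank_of_ne conf _ hne]; decide
                  · intro x hx s hs
                    have hxc : x ≠ conf := fun e => hc (e ▸ hx)
                    rw [pvRank_of_ne conf x hxc] at hs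
                    rcases pvDget_spec x s hs with ⟨rfl, rfl⟩ | ⟨rfl, rfl⟩ | ⟨rfl, rfl⟩ | ⟨rfl, rfl⟩ | ⟨rfl, rfl⟩ | ⟨rfl, rfl⟩ | ⟨rfl, rfl⟩ | ⟨rfl, rfl⟩ | ⟨rfl, rfl⟩ | ⟨rfl, rfl⟩ <;>
                      first | omega | (exact absurd hx h0) | (exact absurd hx h1) | (exact absurd hx h2) | (exact absurd hx h3) | (exact absurd hx h4) | (exact absurd hx h5)
                · -- candidate 6 not present; continue
                  by_cases h7 : ("run_tool" : String) ∈ g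
                  · have hA : pvCandLoop g pvCands = some "run_tool" := by
                      simp only [pvCandLoop, pvCands, if_neg h0, if_neg h1, if_neg h2, if_neg h3, if_neg h4, if_neg h5, if_neg h6, if_pos h7]
                    rw [hA]
                    have hne : ("run_tool" : String) ≠ conf := fun e => hc (e ▸ h7)
                    refine (pvAlt_of_best g conf 7 "run_tool" h7 ?_ ?_).symm
                    · rw [pvRank_of_ne conf _ hne]; decide
                    · intro x hx s hs
                      have hxc : x ≠ conf := fun e => hc (e ▸ hx)
                      rw [pvRank_of_ne conf x hxc] at hs
                      rcases pvDget_spec x s hs with ⟨rfl, rfl⟩ | ⟨rfl, rfl⟩ | ⟨rfl, rfl⟩ | ⟨rfl, rfl⟩ | ⟨rfl, rfl⟩ | ⟨rfl, rfl⟩ | ⟨rfl, rfl⟩ | ⟨rfl, rfl⟩ | ⟨rfl, rfl⟩ | ⟨rfl, rfl⟩ <;>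
                        first | omega | (exact absurd hx h0) | (exact absurd hx h1) | (exact absurd hx h2) | (exact absurd hx h3) | (exact absurd hx h4) | (exact absurd hx h5) | (exact absurd hx h6)
                  · -- candidate 7 not present; continue
                    by_cases h8 : ("invoke_tool" : String) ∈ g
                    · have hA : pvCandLoop g pvCands = some "invoke_tool" := by
                        simp only [pvCandLoop, pvCands, if_neg h0, if_neg h1, if_neg h2, if_neg h3, if_neg h4, if_neg h5, if_neg h6, if_neg h7, if_pos h8]
                      rw [hA]
                      have hne : ("invoke_tool" : String) ≠ conf := fun e => hc (e ▸ h8)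
                      refine (pvAlt_of_best g conf 8 "invoke_tool" h8 ?_ ?_).symm
                      · rw [pvRank_of_ne conf _ hne]; decide
                      · intro x hx s hs
                        have hxc : x ≠ conf := fun e => hc (e ▸ hx)
                        rw [pvRank_of_ne conf x hxc] at hs
                        rcases pvDget_spec x s hs with ⟨rfl, rfl⟩ | ⟨rfl, rfl⟩ | ⟨rfl, rfl⟩ | ⟨rfl, rfl⟩ | ⟨rfl, rfl⟩ | ⟨rfl, rfl⟩ | ⟨rfl, rfl⟩ | ⟨rfl, rfl⟩ | ⟨rfl, rfl⟩ | ⟨rfl, rfl⟩ <;>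
                          first | omega | (exact absurd hx h0) | (exact absurd hx h1) | (exact absurd hx h2) | (exact absurd hx h3) | (exact absurd hx h4) | (exact absurd hx h5) | (exact absurd hx h6) | (exact absurd hx h7)
                    · -- candidate 8 not present; continue
                      by_cases h9 : ("execute_tool" : String) ∈ g
                      · have hA : pvCandLoop g pvCands = some "execute_tool" := by
                          simp only [pvCandLoop, pvCands, if_neg h0, if_neg h1, if_neg h2, if_neg h3, if_neg h4, if_neg h5, if_neg h6, if_neg h7, if_neg h8, if_pos h9]
                        rw [hA]
                        have hne : ("execute_tool" : String) ≠ conf := fun e => hc (e ▸ h9)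
                        refine (pvAlt_of_best g conf 9 "execute_tool" h9 ?_ ?_).symm
                        · rw [pvRank_of_ne conf _ hne]; decide
                        · intro x hx s hs
                          have hxc : x ≠ conf := fun e => hc (e ▸ hx)
                          rw [pvRank_of_ne conf x hxc] at hs
                          rcases pvDget_spec x s hs with ⟨rfl, rfl⟩ | ⟨rfl, rfl⟩ | ⟨rfl, rfl⟩ | ⟨rfl, rfl⟩ | ⟨rfl, rfl⟩ | ⟨rfl, rfl⟩ | ⟨rfl, rfl⟩ | ⟨rfl, rfl⟩ | ⟨rfl, rfl⟩ | ⟨rfl, rfl⟩ <;>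
                            first | omega | (exact absurd hx h0) | (exact absurd hx h1) | (exact absurd hx h2) | (exact absurd hx h3) | (exact absurd hx h4) | (exact absurd hx h5) | (exact absurd hx h6) | (exact absurd hx h7) | (exact absurd hx h8)
                      · -- candidate 9 not present; continue
                        have hA : pvCandLoop g pvCands = none := by
                          simp only [pvCandLoop, pvCands, if_neg h0, if_neg h1, if_neg h2, if_neg h3, if_neg h4, if_neg h5, if_neg h6, if_neg h7, if_neg h8, if_neg h9]
                        rw [hA]
                        rw [pvAlt_of_none g conf ?_, pvHeurLoop_eq_find]
                        intro x hx
                        have hxc : x ≠ conf := fun e => hc (e ▸ hx)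
                        rw [pvRank_of_ne conf x hxc]
                        cases hdx : pvRankDict.get? x with
                        | none => rfl
                        | some s =>
                          rcases pvDget_spec x s hdx with ⟨rfl, rfl⟩ | ⟨rfl, rfl⟩ | ⟨rfl, rfl⟩ | ⟨rfl, rfl⟩ | ⟨rfl, rfl⟩ | ⟨rfl, rfl⟩ | ⟨rfl, rfl⟩ | ⟨rfl, rfl⟩ | ⟨rfl, rfl⟩ | ⟨rfl, rfl⟩ <;>
                            first | (exact absurd hx h0) | (exact absurd hx h1) | (exact absurd hx h2) | (exact absurd hx h3) | (exact absurd hx h4) | (exact absurd hx h5) | (exact absurd hx h6) | (exact absurd hx h7) | (exact absurd hx h8) | (exact absurd hx h9)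

-- ===== VERDICT (by name: the statement is the Claim_ definition above) =====
theorem auto_detect_call_meta_py_spec : Claim_equal_auto_detect_call_meta_py := by
  intro g conf _
  unfold Spec_auto_detect_call_meta_py
  exact pvMain g conf
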